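-- pv_equiv track=rewrite | github.com/pinkycatt/sourcecode | com/prestonsproductions/sourcecode/BoxFactory2018/BoxFactory2018A.py | getPrimeNumberBoxesVolume
-- ===== SOURCE A (Python) =====
-- def getPrimeNumberBoxesVolume(x):
--     total = 0
--     count = 0
--     nbr = 2
--     while (count < x):
--         prime = True
--         for i in range(1,nbr):
--             if (nbr % i == 0 and i > 1):
--                 prime = False
--         if (prime):
--             total += (nbr**3)
--             count += 1
--         nbr += 1
--     return total
-- ===== SOURCE B (Python) =====
-- def _is_prime(n):
--     d = 2
--     while d * d <= n:
--         if n % d == 0: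
--             return False
--         d += 1
--     return True
--
--
-- def getPrimeNumberBoxesVolume(x):
--     total = 0
--     remaining = x
--     nbr = 2
--     while remaining > 0:
--         if _is_prime(nbr):
--             total += nbr ** 3
--             remaining -= 1
--         nbr += 1
--     return total
-- ===== Notes on version B (the rewrite author's own statement) =====
-- stated objective: faster
-- what changed: Replaces A's full scan of every i in 1..nbr-1 per candidate with trial division up to sqrt(nbr) that stops at the first divisor, and counts down the remaining primes instead of counting up.
import Mathlib
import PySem

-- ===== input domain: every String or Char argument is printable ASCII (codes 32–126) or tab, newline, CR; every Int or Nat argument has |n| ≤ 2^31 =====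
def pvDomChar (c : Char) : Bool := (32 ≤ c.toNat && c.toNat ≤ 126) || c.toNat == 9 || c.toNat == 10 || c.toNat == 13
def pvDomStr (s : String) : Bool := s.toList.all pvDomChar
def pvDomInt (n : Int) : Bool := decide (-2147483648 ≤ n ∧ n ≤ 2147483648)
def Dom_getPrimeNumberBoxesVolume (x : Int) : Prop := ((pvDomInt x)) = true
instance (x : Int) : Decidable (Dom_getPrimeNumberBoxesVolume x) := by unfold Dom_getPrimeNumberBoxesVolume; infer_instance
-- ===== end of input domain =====

-- B replaces A's full scan of 1..nbr-1 per candidate with trial division up to √nbr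
-- with early break (objective: faster, measured on the timing inputs).

-- ===== PORT A =====
-- A's while loop searches for primes without a syntactic bound; the fuel
-- 64 * x + 1 outer iterations is a totality guard only: it exceeds the x-th prime
-- for every x (p_x < 26 x for x ≤ 2^31), so the port computes exactly A's value.
def pvLoopA (fuel : Nat) (x total count nbr : Int) : Int :=
  match fuel with
  | 0 => total
  | f + 1 =>
    if count < x then
      -- prime = True; for i in range(1, nbr): if nbr % i == 0 and i > 1: prime = False
      let prime := (PySem.List.pyRange 1 nbr 1).foldl
        (fun prime i => if PySem.Int.mod nbr i = 0 ∧ i > 1 then false else prime) true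
      if prime then pvLoopA f x (total + nbr ^ 3) (count + 1) (nbr + 1)
      else pvLoopA f x total count (nbr + 1)
    else total

def getPrimeNumberBoxesVolume (x : Int) : Int := pvLoopA (x.toNat * 64 + 1) x 0 0 2

-- ===== PORT B =====
-- while d * d <= n: if n % d == 0: return False; d += 1 — the '2 ≤ d' conjunct is a
-- termination guard only (d starts at 2 and only increases, so it is always true).
def pvIsPrimeB (n : Int) (d : Int) : Bool :=
  if h : d * d ≤ n ∧ 2 ≤ d then
    if PySem.Int.mod n d = 0 then false
    else pvIsPrimeB n (d + 1)
  else true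
termination_by (n + 1 - d).toNat
decreasing_by
  have hd : d < n := by nlinarith [h.1, h.2]
  omega

-- same fuel-style totality guard as the port of A
def pvLoopB (fuel : Nat) (total remaining nbr : Int) : Int :=
  match fuel with
  | 0 => total
  | f + 1 =>
    if remaining > 0 then
      if pvIsPrimeB nbr 2 then pvLoopB f (total + nbr ^ 3) (remaining - 1) (nbr + 1)
      else pvLoopB f total remaining (nbr + 1)
    else total

def getPrimeNumberBoxesVolume_alt (x : Int) : Int := pvLoopB (x.toNat * 64 + 1) 0 x 2

-- ===== PRECONDITION & SPEC =====
def Spec_getPrimeNumberBoxesVolume (x : Int) (out : Int) : Prop := out = getPrimeNumberBoxesVolume_alt x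
instance (x : Int) (out : Int) : Decidable (Spec_getPrimeNumberBoxesVolume x out) := by unfold Spec_getPrimeNumberBoxesVolume; infer_instance

-- ===== CLAIM (what is proved, stated in full; the proofs are below) =====
def Claim_equal_getPrimeNumberBoxesVolume : Prop := ∀ (x : Int), Dom_getPrimeNumberBoxesVolume x → Spec_getPrimeNumberBoxesVolume x (getPrimeNumberBoxesVolume x)

-- ===== LEMMAS AND PROOFS =====

-- A's inner for-loop, as a fold, is an 'all' over the range
theorem pv_foldl_if_false (p : Int → Prop) [DecidablePred p] (l : List Int) (b : Bool) :
    l.foldl (fun acc i => if p i then false else acc) b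
      = (b && l.all fun i => !decide (p i)) := by
  induction l generalizing b with
  | nil => simp
  | cons a t ih =>
      simp only [List.foldl_cons, List.all_cons, ih]
      by_cases hp : p a <;> simp [hp]

-- characterisation of B's trial division
theorem pv_isPrimeB_iff (n d : Int) :
    2 ≤ d → (pvIsPrimeB n d = true ↔
      ∀ e : Int, d ≤ e → e * e ≤ n → PySem.Int.mod n e ≠ 0) := by
  induction d using pvIsPrimeB.induct n with
  | case1 d hcond hm =>
      intro hd
      rw [pvIsPrimeB, dif_pos hcond, if_pos hm]
      simp only [Bool.false_eq_true, false_iff]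
      push_neg
      exact ⟨d, le_refl d, hcond.1, hm⟩
  | case2 d hcond hm ih =>
      intro hd
      rw [pvIsPrimeB, dif_pos hcond, if_neg hm]
      rw [ih (by omega)]
      constructor
      · intro H e hde he2
        rcases eq_or_lt_of_le hde with rfl | hlt
        · exact hm
        · exact H e (by omega) he2
      · intro H e hde he2
        exact H e (by omega) he2
  | case3 d hcond =>
      intro hd
      rw [pvIsPrimeB, dif_neg hcond]
      simp only [true_iff]
      intro e hde he2 _
      have hn : n < d * d := by
        by_contra hc
        exact hcond ⟨by omega, hd⟩
      have : d * d ≤ e * e := by nlinarith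
      omega

-- the two primality tests agree for every candidate nbr ≥ 2
theorem pv_test_eq (nbr : Int) (h2 : 2 ≤ nbr) :
    ((PySem.List.pyRange 1 nbr 1).foldl
        (fun prime i => if PySem.Int.mod nbr i = 0 ∧ i > 1 then false else prime) true)
      = pvIsPrimeB nbr 2 := by
  rw [pv_foldl_if_false (fun i => PySem.Int.mod nbr i = 0 ∧ i > 1)]
  by_cases hbp : pvIsPrimeB nbr 2 = true
  · -- no divisor up to √nbr, hence none in 1..nbr-1 at all
    have H := (pv_isPrimeB_iff nbr 2 (le_refl 2)).mp hbp
    rw [hbp]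
    simp only [Bool.true_and, List.all_eq_true]
    intro i hi
    rw [PySem.List.mem_pyRange_one] at hi
    simp only [Bool.not_eq_true', decide_eq_false_iff_not]
    rintro ⟨him, hi1⟩
    -- i divides nbr, 1 < i < nbr: either i ≤ √nbr or the cofactor is
    have hdvd : i ∣ nbr := (PySem.Int.mod_eq_zero_iff_dvd nbr i).mp him
    obtain ⟨j, hj⟩ := hdvd
    have hj2 : 2 ≤ j := by nlinarith
    by_cases hii : i * i ≤ nbr
    · exact H i (by omega) hii him
    · have hji : j < i := by nlinarith
      have hjj : j * j ≤ nbr := by nlinarith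
      have hjm : PySem.Int.mod nbr j = 0 :=
        (PySem.Int.mod_eq_zero_iff_dvd nbr j).mpr ⟨i, by linarith [hj, mul_comm i j]⟩
      exact H j hj2 hjj hjm
  · -- some divisor e with 2 ≤ e, e*e ≤ nbr exists; it lies in 1..nbr-1 and kills the fold
    have hb : pvIsPrimeB nbr 2 = false := eq_false_of_ne_true hbp
    rw [hb]
    have hne : ¬ ∀ e : Int, 2 ≤ e → e * e ≤ nbr → PySem.Int.mod nbr e ≠ 0 := by
      intro H
      exact hbp ((pv_isPrimeB_iff nbr 2 (le_refl 2)).mpr H)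
    push_neg at hne
    obtain ⟨e, he2, hee, hem⟩ := hne
    have hlt : e < nbr := by nlinarith
    simp only [Bool.true_and]
    rw [List.all_eq_false]
    refine ⟨e, by rw [PySem.List.mem_pyRange_one]; omega, ?_⟩
    have h1e : (1 : Int) < e := by omega
    simp [hem, h1e]

-- the outer loops stay in lock-step: remaining = x - count
theorem pv_loop_eq (fuel : Nat) (x : Int) :
    ∀ total count nbr : Int, 2 ≤ nbr →
      pvLoopA fuel x total count nbr = pvLoopB fuel total (x - count) nbr := by
  induction fuel with
  | zero => intro total count nbr _; rfl
  | succ f ih =>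
      intro total count nbr h2
      rw [pvLoopA, pvLoopB]
      by_cases hc : count < x
      · rw [if_pos hc, pv_test_eq nbr h2, if_pos (show x - count > 0 by omega)]
        by_cases hp : pvIsPrimeB nbr 2 = true
        · rw [if_pos hp, if_pos hp, ih (total + nbr ^ 3) (count + 1) (nbr + 1) (by omega),
            show x - (count + 1) = x - count - 1 from by ring]
        · rw [if_neg hp, if_neg hp]
          exact ih total count (nbr + 1) (by omega)
      · rw [if_neg hc, if_neg (show ¬ x - count > 0 by omega)]

-- ===== VERDICT (by name: the statement is the Claim_ definition above) =====
theorem getPrimeNumberBoxesVolume_spec : Claim_equal_getPrimeNumberBoxesVolume := by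
  intro x _
  show getPrimeNumberBoxesVolume x = getPrimeNumberBoxesVolume_alt x
  unfold getPrimeNumberBoxesVolume getPrimeNumberBoxesVolume_alt
  have := pv_loop_eq (x.toNat * 64 + 1) x 0 0 2 (le_refl 2)
  simpa using this
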